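-- pv_equiv track=rewrite | github.com/Vusal-Layijov/daily_ds-a | python/canIwin.py | gamingArray
-- ===== SOURCE A (Python) =====
-- def gamingArray(arr):
--     winner = 1
--     while len(arr) > 1:
--         max_index = arr.index(max(arr))
--         arr = arr[:max_index]
--         if len(arr)==0:
--             return 'BOB' if winner else 'ANDY'
--         winner = 1 - winner
--
--     return 'BOB' if winner else 'ANDY'
-- ===== SOURCE B (Python) =====
-- def gamingArray(arr):
--     moves = 0
--     best = None
--     for x in arr:
--         if best is None or x > best:
--             best = x
--             moves += 1
--     return 'BOB' if moves % 2 == 1 else 'ANDY'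
-- ===== Notes on version B (the rewrite author's own statement) =====
-- stated objective: faster
-- what changed: Replaced A's repeated max/index/truncate while-loop with a single left-to-right pass counting running maxima, deciding the winner by the parity of that count.
-- outside the precondition, e.g. on gamingArray([]): A returns 'BOB', B returns 'ANDY'
import Mathlib
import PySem

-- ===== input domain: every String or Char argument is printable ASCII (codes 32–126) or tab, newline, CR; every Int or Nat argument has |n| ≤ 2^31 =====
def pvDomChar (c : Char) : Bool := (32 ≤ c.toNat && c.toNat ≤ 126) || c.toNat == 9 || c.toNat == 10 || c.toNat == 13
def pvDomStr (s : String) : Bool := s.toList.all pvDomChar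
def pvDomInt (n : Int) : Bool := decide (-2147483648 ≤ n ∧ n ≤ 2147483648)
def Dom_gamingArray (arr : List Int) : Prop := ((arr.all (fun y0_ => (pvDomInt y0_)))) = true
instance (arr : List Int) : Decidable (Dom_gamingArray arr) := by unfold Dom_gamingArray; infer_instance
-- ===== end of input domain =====

-- B is a one-pass O(n) count of left-to-right maxima (parity decides the winner) instead of
-- A's repeated max/index/truncate O(n^2) loop; equivalence about the RETURN value (A rebinds, not mutates, arr).

-- ===== PORT A =====
-- while-loop of A as structural recursion on the shrinking arr; winner is the Python int 1/0
def gamingArrayGo (arr : List Int) (winner : Int) : String :=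
  if _h : arr.length > 1 then
    match _hm : PySem.List.max? arr (fun y => y) with
    | none => "ANDY"   -- unreachable (arr nonempty); totality guard only
    | some m =>
      match hi : PySem.List.index? arr m with
      | none => "ANDY" -- unreachable (m ∈ arr); totality guard only
      | some max_index =>
        let arr' := PySem.List.slice arr none (some (max_index : Int))  -- arr[:max_index]
        if arr'.length = 0 then (if winner ≠ 0 then "BOB" else "ANDY")
        else gamingArrayGo arr' (1 - winner)
  else (if winner ≠ 0 then "BOB" else "ANDY")
termination_by arr.length
decreasing_by
  · rw [PySem.List.slice_to_natCast] at *
    rcases PySem.List.getElem_of_index?_eq_some hi with ⟨hk, _, _⟩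
    simp only [List.length_take]
    omega

def gamingArray (arr : List Int) : String := gamingArrayGo arr 1

-- ===== PORT B =====
-- state (moves, best) of Source B's single for-loop
def gamingArrayStep (st : Int × Option Int) (x : Int) : Int × Option Int :=
  match st.2 with
  | none => (st.1 + 1, some x)
  | some b => if x > b then (st.1 + 1, some x) else st

def gamingArray_alt (arr : List Int) : String :=
  let r := arr.foldl gamingArrayStep (0, none)
  if r.1 % 2 == 1 then "BOB" else "ANDY"

-- ===== PRECONDITION & SPEC =====
-- Pre_ excludes only the empty list: the game there is void and A's 'BOB' (from the initial
-- winner = 1 with zero moves) and B's 'ANDY' (zero moves, even parity) are equally defensible.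
def Pre_gamingArray (arr : List Int) : Prop := arr ≠ []
instance (arr : List Int) : Decidable (Pre_gamingArray arr) := by unfold Pre_gamingArray; infer_instance
def pvWitness_gamingArray : List Int := ([3, 1, 2])

def Spec_gamingArray (arr : List Int) (out : String) : Prop := out = gamingArray_alt arr
instance (arr : List Int) (out : String) : Decidable (Spec_gamingArray arr out) := by unfold Spec_gamingArray; infer_instance

-- ===== CLAIM (what is proved, stated in full; the proofs are below) =====
def Claim_equal_gamingArray : Prop := ∀ (arr : List Int), Dom_gamingArray arr → Pre_gamingArray arr → Spec_gamingArray arr (gamingArray arr)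

-- ===== LEMMAS AND PROOFS =====

-- the "moves" counter of B on a list
def pvMoves (arr : List Int) : Int := (arr.foldl gamingArrayStep (0, none)).1

theorem pv_step_fixed (l : List Int) (c : Int) (M : Int) (h : ∀ x ∈ l, x ≤ M) :
    l.foldl gamingArrayStep (c, some M) = (c, some M) := by
  induction l with
  | nil => rfl
  | cons a t ih =>
    have ha : a ≤ M := h a (by simp)
    simp only [List.foldl_cons, gamingArrayStep, if_neg (by omega : ¬ a > M)]
    exact ih (fun x hx => h x (by simp [hx]))

-- the best-so-far is none (list empty) or an element of the scanned list ∪ the initial best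
theorem pv_snd_mem (l : List Int) (c : Int) (ob : Option Int) :
    (l.foldl gamingArrayStep (c, ob)).2 = ob ∨ ∃ b ∈ l, (l.foldl gamingArrayStep (c, ob)).2 = some b := by
  induction l generalizing c ob with
  | nil => exact Or.inl rfl
  | cons a t ih =>
    simp only [List.foldl_cons]
    have key : ∀ (c' : Int), (t.foldl gamingArrayStep (c', some a)).2 = some a ∨
        ∃ b ∈ a :: t, (t.foldl gamingArrayStep (c', some a)).2 = some b := by
      intro c'
      rcases ih c' (some a) with h | ⟨b, hb, h⟩
      · exact Or.inl h
      · exact Or.inr ⟨b, by simp [hb], h⟩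
    match ob with
    | none =>
      simp only [gamingArrayStep]
      rcases key (c + 1) with h | ⟨b, hb, h⟩
      · exact Or.inr ⟨a, by simp, h⟩
      · exact Or.inr ⟨b, hb, h⟩
    | some b0 =>
      simp only [gamingArrayStep]
      by_cases hab : a > b0
      · simp only [if_pos hab]
        rcases key (c + 1) with h | ⟨b, hb, h⟩
        · exact Or.inr ⟨a, by simp, h⟩
        · exact Or.inr ⟨b, hb, h⟩
      · simp only [if_neg hab]
        rcases ih c (some b0) with h | ⟨b, hb, h⟩
        · exact Or.inl h
        · exact Or.inr ⟨b, by simp [hb], h⟩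

-- key decomposition: if arr = pre ++ M :: suf with pre's elements < M and suf's ≤ M,
-- then pvMoves arr = pvMoves pre + 1
theorem pv_moves_decomp (pre suf : List Int) (M : Int)
    (hpre : ∀ x ∈ pre, x < M) (hsuf : ∀ x ∈ suf, x ≤ M) :
    pvMoves (pre ++ M :: suf) = pvMoves pre + 1 := by
  unfold pvMoves
  rw [List.foldl_append]
  set r := pre.foldl gamingArrayStep (0, (none : Option Int)) with hr
  have h2 : r.2 = none ∨ ∃ b ∈ pre, r.2 = some b := pv_snd_mem pre 0 none
  have hstep : gamingArrayStep r M = (r.1 + 1, some M) := by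
    rcases h2 with h | ⟨b, hb, h⟩
    · simp [gamingArrayStep, h]
    · simp [gamingArrayStep, h, if_pos (hpre b hb)]
  have : (M :: suf).foldl gamingArrayStep r = (r.1 + 1, some M) := by
    simp only [List.foldl_cons, hstep]
    exact pv_step_fixed suf (r.1 + 1) M hsuf
  rw [this]

-- main invariant: for nonempty arr and winner ∈ {0,1}, A's loop returns BOB iff pvMoves arr + winner is even
theorem pv_go_eq (n : Nat) : ∀ (arr : List Int), arr.length ≤ n → arr ≠ [] → ∀ (w : Int), (w = 0 ∨ w = 1) →
    gamingArrayGo arr w = (if (pvMoves arr + w) % 2 == 0 then "BOB" else "ANDY") := by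
  induction n with
  | zero =>
    intro arr h h0
    exact absurd (List.eq_nil_iff_length_eq_zero.mpr (by omega)) h0
  | succ n ih =>
    intro arr hlen hne w hw
    by_cases h1 : arr.length > 1
    · -- get max and its first index
      obtain ⟨m, hm⟩ : ∃ m, PySem.List.max? arr (fun y => y) = some m := by
        cases hmm : PySem.List.max? arr (fun y => y) with
        | none => exact absurd ((PySem.List.max?_eq_none_iff _ _).mp hmm) hne
        | some m => exact ⟨m, rfl⟩
      have hmem : m ∈ arr := PySem.List.max?_mem hm
      have hmax : ∀ y ∈ arr, y ≤ m := PySem.List.max?_isMax hm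
      obtain ⟨i, hi⟩ : ∃ i, PySem.List.index? arr m = some i := by
        cases hii : PySem.List.index? arr m with
        | none => exact absurd hmem ((PySem.List.index?_eq_none_iff _ _).mp hii)
        | some i => exact ⟨i, rfl⟩
      obtain ⟨pre, suf, harr, hprelen, hnotin⟩ := (PySem.List.index?_eq_some_iff _ _ _).mp hi
      have hpre : ∀ x ∈ pre, x < m := by
        intro x hx
        have hle : x ≤ m := hmax x (by simp [harr, hx])
        have hneq : x ≠ m := fun he => hnotin (he ▸ hx)
        omega
      have hsuf : ∀ x ∈ suf, x ≤ m := fun x hx => hmax x (by simp [harr, hx])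
      have htake : PySem.List.slice arr none (some (i : Int)) = pre := by
        rw [PySem.List.slice_to_natCast, harr, ← hprelen, List.take_left]
      have hmoves : pvMoves arr = pvMoves pre + 1 := by
        rw [harr]; exact pv_moves_decomp pre suf m hpre hsuf
      rw [gamingArrayGo]
      simp only [dif_pos h1]
      split
      next hmm => rw [hm] at hmm; cases hmm
      next m' hmm =>
      rw [hm] at hmm
      injection hmm with hmm'
      subst hmm'
      split
      next hii => rw [hi] at hii; cases hii
      next i' hii =>
      rw [hi] at hii
      injection hii with hii'
      subst hii'
      rw [htake]
      by_cases hp : pre.length = 0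
      · have hpe : pre = [] := List.eq_nil_iff_length_eq_zero.mpr hp
        have hm1 : pvMoves arr = 1 := by rw [hmoves, hpe]; rfl
        simp only [if_pos hp, hm1]
        rcases hw with rfl | rfl <;> norm_num
      · have hpne : pre ≠ [] := fun he => hp (by simp [he])
        have hplen : pre.length ≤ n := by
          have : arr.length = pre.length + suf.length + 1 := by simp [harr]; omega
          omega
        simp only [if_neg hp]
        rw [ih pre hplen hpne (1 - w) (by omega), hmoves]
        have hpar : (pvMoves pre + (1 - w)) % 2 = (pvMoves pre + 1 + w) % 2 := by omega
        rw [hpar]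
    · -- arr = [a]
      have hone : arr.length = 1 := by
        rcases Nat.lt_or_ge arr.length 1 with h | h
        · exact absurd (List.eq_nil_iff_length_eq_zero.mpr (by omega)) hne
        · omega
      obtain ⟨a, ha⟩ : ∃ a, arr = [a] := List.length_eq_one_iff.mp hone
      have hm1 : pvMoves arr = 1 := by rw [ha]; rfl
      rw [gamingArrayGo]
      simp only [dif_neg h1, hm1]
      rcases hw with rfl | rfl <;> norm_num

-- ===== VERDICT (by name: the statement is the Claim_ definition above) =====
theorem gamingArray_spec : Claim_equal_gamingArray := by
  intro arr _ hpre
  unfold Spec_gamingArray gamingArray gamingArray_alt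
  rw [pv_go_eq arr.length arr le_rfl hpre 1 (Or.inr rfl)]
  unfold pvMoves
  have : ((arr.foldl gamingArrayStep (0, none)).1 + 1) % 2 = 0 ↔
      (arr.foldl gamingArrayStep (0, none)).1 % 2 = 1 := by omega
  by_cases h : (arr.foldl gamingArrayStep (0, none)).1 % 2 = 1
  · simp [h, this.mpr h]
  · have h0 : ((arr.foldl gamingArrayStep (0, none)).1 + 1) % 2 ≠ 0 := fun hc => h (this.mp hc)
    simp [h, h0]
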